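-- pv_equiv track=rewrite | github.com/GundalaNikhil/DSA | dsa-problems/NumberTheory/solutions/python/NUM-010-sum-divisors-range.py | range_sigma
-- ===== SOURCE A (Python) =====
-- def range_sigma(L: int, R: int) -> int:
--     MOD = 1000000007
--     sigma = [0] * (R + 1)
--
--     for i in range(1, R + 1):
--         for j in range(i, R + 1, i):
--             sigma[j] += i
--
--     total = 0
--     for i in range(L, R + 1):
--         total = (total + sigma[i]) % MOD
--
--     return total
-- ===== SOURCE B (Python) =====
-- def range_sigma(L: int, R: int) -> int:
--     MOD = 1000000007
--     # S(n) = sum_{i=1}^{n} sigma(i) = sum_{d=1}^{n} d * (n // d)  (count multiples of each divisor)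
--     def S(n):
--         return sum(d * (n // d) for d in range(1, n + 1))
--     lo = max(L, 1)
--     if lo > R:
--         return 0
--     return (S(R) - S(lo - 1)) % MOD
-- ===== Notes on version B (the rewrite author's own statement) =====
-- stated objective: faster
-- what changed: Replaces A's O(R log R) multiples-sieve into an O(R) array plus a second summation pass by the divisor-count identity S(n) = sum_{d=1}^{n} d*(n//d) (prefix sum of sigma), returning (S(R) - S(lo-1)) % MOD in one flat O(R) loop with no array (measured ~26x at R=262144).
-- intended difference: On L < 0 and R >= 1, A's negative indices wrap around (sigma[i] reads sigma[R+1+i]) so A double-counts a tail of the sigma array (A(-1,2)=7), while B counts no sigma(i) for i < 1 (B(-1,2)=4), the intended reading of a range sum of sigma. — e.g. on range_sigma(-1, 2): A returns 7, B returns 4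
import Mathlib
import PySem

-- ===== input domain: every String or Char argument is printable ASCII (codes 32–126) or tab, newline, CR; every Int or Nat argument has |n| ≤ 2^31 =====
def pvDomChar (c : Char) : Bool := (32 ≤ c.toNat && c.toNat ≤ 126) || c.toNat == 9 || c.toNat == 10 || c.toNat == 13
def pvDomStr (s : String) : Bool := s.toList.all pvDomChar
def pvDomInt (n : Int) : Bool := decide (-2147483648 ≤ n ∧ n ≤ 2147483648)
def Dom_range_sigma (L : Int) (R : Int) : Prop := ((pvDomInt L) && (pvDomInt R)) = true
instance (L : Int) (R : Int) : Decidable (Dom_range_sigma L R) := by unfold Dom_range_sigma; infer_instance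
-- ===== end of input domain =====

-- B replaces A's divisor sieve over an O(R)-sized array plus a second summation pass by the
-- divisor-count identity sum_{i=1..n} sigma(i) = sum_{d=1..n} d*(n//d), evaluated as a prefix-sum
-- difference S(R) - S(lo-1): one flat loop, no array (objective: faster, constant-factor).

-- ===== PORT A =====
-- Python list helpers on Array (a Python list IS a dynamic array): a[i] with a default
-- (negative i from the end, out of range = default) and a[i] = v (only used with 0 ≤ i).
-- Proved exact against PySem.List.pyGetD / pySetD below (pyArrGetD_toList / pyArrSetD_toList).
def pyArrGetD (a : Array Int) (i : Int) (d : Int) : Int :=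
  if 0 ≤ i then a.getD i.toNat d
  else if 0 ≤ (a.size : Int) + i then a.getD ((a.size : Int) + i).toNat d else d

def pyArrSetD (a : Array Int) (i : Int) (v : Int) : Array Int :=
  if 0 ≤ i then a.setIfInBounds i.toNat v else a

def range_sigma (L : Int) (R : Int) : Int :=
  let MOD : Int := 1000000007
  let sigma0 : Array Int := Array.replicate (R + 1).toNat 0   -- [0] * (R + 1)
  let sigma : Array Int :=
    (PySem.List.pyRange 1 (R + 1) 1).foldl (fun s i =>
      (PySem.List.pyRange i (R + 1) i).foldl (fun s' j =>
        pyArrSetD s' j (pyArrGetD s' j 0 + i)) s) sigma0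
  -- the writes sigma[j] += i always have j in range; the reads sigma[i] in the total loop
  -- (including Python's negative wraparound) are in range on every input Pre_ admits.
  (PySem.List.pyRange L (R + 1) 1).foldl (fun total i =>
    PySem.Int.mod (total + pyArrGetD sigma i 0) MOD) 0

-- ===== PORT B =====
-- S(n) = sum_{d=1}^{n} d * (n // d)
def sumSigmaS (n : Int) : Int :=
  (PySem.List.pyRange 1 (n + 1) 1).foldl (fun acc d => acc + d * PySem.Int.floordiv n d) 0

def range_sigma_alt (L : Int) (R : Int) : Int :=
  let MOD : Int := 1000000007
  let lo : Int := max L 1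
  if lo > R then 0
  else PySem.Int.mod (sumSigmaS R - sumSigmaS (lo - 1)) MOD

-- ===== PRECONDITION & SPEC =====
-- Pre_ excludes exactly the inputs where A raises IndexError: L ≤ R with R < 0 (sigma is the
-- empty list) or with L < -(R+1) (an index below -len(sigma)).
def Pre_range_sigma (L : Int) (R : Int) : Prop := R < L ∨ (0 ≤ R ∧ -(R + 1) ≤ L)
instance (L : Int) (R : Int) : Decidable (Pre_range_sigma L R) := by unfold Pre_range_sigma; infer_instance
def pvWitness_range_sigma : Int × Int := (2, 6)

-- On L < 0 ≤ 1 ≤ R, A's Python wraps each negative index i ∈ [L,-1] around (sigma[i] = sigma[R+1+i])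
-- and so double-counts a tail of the sigma array; B counts no sigma(i) for i < 1, the intended
-- reading of a range sum of sigma.
def D_range_sigma (L : Int) (R : Int) : Prop := L < 0 ∧ 1 ≤ R
instance (L : Int) (R : Int) : Decidable (D_range_sigma L R) := by unfold D_range_sigma; infer_instance

def Spec_range_sigma (L : Int) (R : Int) (out : Int) : Prop := ¬ D_range_sigma L R → out = range_sigma_alt L R
instance (L : Int) (R : Int) (out : Int) : Decidable (Spec_range_sigma L R out) := by unfold Spec_range_sigma; infer_instance

def pvDiffWitness_range_sigma : Int × Int := (-1, 2)
def pvDiffWitnessOut_range_sigma : Int × Int := (7, 4)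

-- ===== CLAIM (what is proved, stated in full; the proofs are below) =====
def Claim_unchanged_range_sigma : Prop := ∀ (L : Int) (R : Int), Dom_range_sigma L R → Pre_range_sigma L R → Spec_range_sigma L R (range_sigma L R)
def Claim_changed_range_sigma : Prop := Dom_range_sigma (pvDiffWitness_range_sigma.1) (pvDiffWitness_range_sigma.2) ∧ Pre_range_sigma (pvDiffWitness_range_sigma.1) (pvDiffWitness_range_sigma.2) ∧ D_range_sigma (pvDiffWitness_range_sigma.1) (pvDiffWitness_range_sigma.2) ∧ range_sigma (pvDiffWitness_range_sigma.1) (pvDiffWitness_range_sigma.2) = pvDiffWitnessOut_range_sigma.1 ∧ range_sigma_alt (pvDiffWitness_range_sigma.1) (pvDiffWitness_range_sigma.2) = pvDiffWitnessOut_range_sigma.2 ∧ pvDiffWitnessOut_range_sigma.1 ≠ pvDiffWitnessOut_range_sigma.2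

-- ===== LEMMAS AND PROOFS =====

lemma arr_getD_toList (a : Array Int) (n : Nat) (d : Int) : a.getD n d = a.toList.getD n d := by
  simp only [Array.getD, List.getD]
  by_cases h : n < a.size <;> simp [h, -Array.getElem?_toList]

lemma pyArrGetD_toList (a : Array Int) (i : Int) (d : Int) :
    pyArrGetD a i d = PySem.List.pyGetD a.toList i d := by
  unfold pyArrGetD
  by_cases h0 : 0 ≤ i
  · rw [if_pos h0, PySem.List.pyGetD_of_nonneg _ _ h0, arr_getD_toList]
  · rw [if_neg h0]
    by_cases h1 : 0 ≤ (a.size : Int) + i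
    · rw [if_pos h1, arr_getD_toList]
      have h := PySem.List.pyGetD_neg_natCast (xs := a.toList) (k := (-i).toNat) (d := d)
        (by omega) (by simp; omega)
      rw [show -(((-i).toNat : Nat) : Int) = i by omega] at h
      rw [h, show ((a.size:Int)+i).toNat = a.toList.length - (-i).toNat by simp; omega,
          List.getD_eq_getElem _ _ (by simp; omega)]
    · rw [if_neg h1]
      symm
      apply PySem.List.pyGetD_of_none
      rw [PySem.List.pyGet?_eq_none_iff]
      unfold PySem.Raise.InRange
      simp
      omega

lemma pyArrSetD_toList (a : Array Int) (i : Int) (v : Int) (h : 0 ≤ i) :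
    (pyArrSetD a i v).toList = PySem.List.pySetD a.toList i v := by
  rw [pyArrSetD, if_pos h, PySem.List.pySetD_of_nonneg _ _ h, Array.toList_setIfInBounds]

lemma foldl_toList_hom {α : Type} (l : List α) (g : Array Int → α → Array Int)
    (g' : List Int → α → List Int) :
    ∀ (a : Array Int), (∀ x ∈ l, ∀ s : Array Int, (g s x).toList = g' s.toList x) →
    (l.foldl g a).toList = l.foldl g' a.toList := by
  induction l with
  | nil => intro a _; rfl
  | cons x l ih =>
    intro a h
    simp only [List.foldl_cons]
    rw [ih _ (fun y hy s => h y (List.mem_cons_of_mem x hy) s), h x List.mem_cons_self]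

-- list-level restatement of port A (proof helper only)
def rangeSigmaList (L : Int) (R : Int) : Int :=
  (PySem.List.pyRange L (R + 1) 1).foldl (fun total i =>
    PySem.Int.mod (total + PySem.List.pyGetD
      ((PySem.List.pyRange 1 (R + 1) 1).foldl (fun s i =>
        (PySem.List.pyRange i (R + 1) i).foldl (fun s' j =>
          PySem.List.pySetD s' j (PySem.List.pyGetD s' j 0 + i)) s)
        (List.replicate (R + 1).toNat 0)) i 0) 1000000007) 0

lemma total_loop_congr (l : List Int) (M : Int) (A : Array Int) (Lst : List Int) (h : A.toList = Lst) :
    l.foldl (fun total i => PySem.Int.mod (total + pyArrGetD A i 0) M) 0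
      = l.foldl (fun total i => PySem.Int.mod (total + PySem.List.pyGetD Lst i 0) M) 0 := by
  subst h
  simp only [pyArrGetD_toList]

lemma range_sigma_eq_list (L R : Int) : range_sigma L R = rangeSigmaList L R := by
  simp only [range_sigma, rangeSigmaList]
  apply total_loop_congr
  rw [foldl_toList_hom _ _
      (fun s i => (PySem.List.pyRange i (R + 1) i).foldl (fun s' j =>
        PySem.List.pySetD s' j (PySem.List.pyGetD s' j 0 + i)) s) _ ?hom, Array.toList_replicate]
  case hom =>
    intro i hi s
    have hi1 : 1 ≤ i := (PySem.List.mem_pyRange_one.mp hi).1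
    apply foldl_toList_hom
    intro j hj s'
    rw [PySem.List.mem_pyRange_iff_of_pos (by omega)] at hj
    rw [pyArrSetD_toList _ _ _ (by omega), pyArrGetD_toList]

lemma set_map_range {N : Nat} (g : Nat → Int) (t : Nat) (v : Int) :
    ((List.range N).map g).set t v = (List.range N).map (fun m => if m = t then v else g m) := by
  apply List.ext_getElem <;> simp
  intro i hi
  rw [List.getElem_set]
  by_cases h : i = t
  · simp [h]
  · rw [if_neg (by omega), if_neg h]; simp

lemma foldl_addAt (v : Int) (js : List Int) : ∀ (g : Nat → Int) (N : Nat),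
    (∀ j ∈ js, 0 ≤ j ∧ j.toNat < N) →
    js.foldl (fun s j => PySem.List.pySetD s j (PySem.List.pyGetD s j 0 + v)) ((List.range N).map g)
      = (List.range N).map (fun m => g m + v * (js.count ((m : Int)))) := by
  induction js with
  | nil => intro g N _; simp
  | cons j js ih =>
    intro g N hj
    obtain ⟨⟨hj0, hjN⟩, hrest⟩ := List.forall_mem_cons.mp hj
    simp only [List.foldl_cons]
    rw [PySem.List.pyGetD_of_nonneg _ _ hj0, PySem.List.pySetD_of_nonneg _ _ hj0,
        PySem.List.getD_map_range _ _ _ _ hjN, set_map_range, ih _ _ hrest]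
    apply List.map_congr_left
    intro m hm
    simp only [List.count_cons]
    by_cases h : m = j.toNat
    · have hmj : (m : Int) = j := by omega
      simp [h, hj0]
      ring
    · have hmj : ¬ ((m : Int) = j) := by omega
      simp [h]
      exact Or.inl (by omega)

lemma nodup_pyRange_pos (a b s : Int) (hs : 0 < s) : (PySem.List.pyRange a b s).Nodup := by
  rw [PySem.List.pyRange_of_pos a b hs]
  apply List.Nodup.map _ (List.nodup_range)
  intro x y h
  have : (x:Int) = y := by nlinarith [h]
  omega

lemma count_pyRange_step (i b m : Int) (hi : 0 < i) :
    ((PySem.List.pyRange i b i).count m : Int) = if i ∣ m ∧ i ≤ m ∧ m < b then 1 else 0 := by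
  by_cases h : m ∈ PySem.List.pyRange i b i
  · have hp : i ∣ m ∧ i ≤ m ∧ m < b := by
      rw [PySem.List.mem_pyRange_iff_of_pos hi] at h
      obtain ⟨h1, h2, k, hk⟩ := h
      exact ⟨⟨k + 1, by linear_combination hk⟩, h1, h2⟩
    rw [List.count_eq_one_of_mem (nodup_pyRange_pos i b i hi) h, if_pos hp]
    norm_num
  · have hp : ¬ (i ∣ m ∧ i ≤ m ∧ m < b) := by
      rintro ⟨⟨k, hk⟩, h2, h3⟩
      rw [PySem.List.mem_pyRange_iff_of_pos hi] at h
      exact h ⟨h2, h3, ⟨k - 1, by linear_combination hk⟩⟩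
    rw [List.count_eq_zero_of_not_mem h, if_neg hp]
    norm_num

def ssum (t : Int) (m : Nat) : Int :=
  ∑ d ∈ Finset.Ioc 0 t.toNat, if d ∣ m ∧ d ≤ m then (d : Int) else 0

lemma sieve (R : Int) (hR : 0 ≤ R) : ∀ (n : Nat), (n : Int) ≤ R →
    (PySem.List.pyRange 1 ((n : Int) + 1) 1).foldl (fun s i =>
      (PySem.List.pyRange i (R + 1) i).foldl (fun s' j =>
        PySem.List.pySetD s' j (PySem.List.pyGetD s' j 0 + i)) s) (List.replicate (R + 1).toNat 0)
      = (List.range (R + 1).toNat).map (fun m => ssum (n : Int) m) := by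
  intro n
  induction n with
  | zero =>
    intro _
    rw [show ((0:Nat):Int) + 1 = 1 by norm_num, PySem.List.pyRange_one_eq_nil (le_refl 1)]
    simp only [List.foldl_nil]
    rw [show (fun m : Nat => ssum ((0:Nat):Int) m) = (fun _ : Nat => (0:Int)) by
          funext m; simp [ssum]]
    simp [List.map_const']
  | succ n ih =>
    intro hn1
    have hn : (n : Int) ≤ R := by omega
    rw [show ((n+1:Nat):Int) + 1 = ((n:Int) + 1) + 1 by push_cast; ring,
        PySem.List.pyRange_one_succ_right (by omega), List.foldl_append, ih hn]
    simp only [List.foldl_cons, List.foldl_nil]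
    rw [foldl_addAt _ _ _ _ (by
      intro j hj
      rw [PySem.List.mem_pyRange_iff_of_pos (by omega)] at hj
      exact ⟨by omega, by omega⟩)]
    apply List.map_congr_left
    intro m hm
    have hmN : m < (R + 1).toNat := List.mem_range.mp hm
    rw [count_pyRange_step ((n:Int)+1) (R+1) (m:Int) (by omega)]
    unfold ssum
    rw [show ((n+1:Nat):Int).toNat = (n:Int).toNat + 1 by omega,
        Finset.sum_Ioc_succ_top (Nat.zero_le _)]
    have hmlt : (m : Int) < R + 1 := by omega
    have hnn : ((n:Int)).toNat = n := by omega
    rw [hnn]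
    have hdvd : ((n:Int) + 1) ∣ (m:Int) ↔ (n + 1) ∣ m := by
      rw [show ((n:Int) + 1) = ((n+1 : Nat) : Int) by push_cast; ring]
      exact Int.natCast_dvd_natCast
    by_cases hc : ((n:Int) + 1) ∣ (m:Int) ∧ (n:Int) + 1 ≤ (m:Int)
    · rw [if_pos ⟨hc.1, hc.2, hmlt⟩, if_pos ⟨hdvd.mp hc.1, by omega⟩]
      push_cast
      ring
    · rw [if_neg (by tauto), if_neg (fun ⟨h1, h2⟩ => hc ⟨hdvd.mpr h1, by omega⟩)]
      ring

lemma foldl_mod_add (p : Int) (hp : 0 < p) (f : Int → Int) (l : List Int) : ∀ t : Int,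
    l.foldl (fun acc x => PySem.Int.mod (acc + f x) p) (PySem.Int.mod t p)
      = PySem.Int.mod (t + (l.map f).sum) p := by
  induction l with
  | nil => intro t; simp
  | cons x l ih =>
    intro t
    simp only [List.foldl_cons, List.map_cons, List.sum_cons]
    rw [PySem.Int.mod_eq_emod_of_pos hp, PySem.Int.mod_eq_emod_of_pos hp,
        Int.emod_add_emod, ← PySem.Int.mod_eq_emod_of_pos hp (a := t + f x), ih (t + f x),
        PySem.Int.mod_eq_emod_of_pos hp, PySem.Int.mod_eq_emod_of_pos hp]
    ring_nf

lemma ssum_zero_m (t : Int) : ssum t 0 = 0 := by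
  unfold ssum
  apply Finset.sum_eq_zero
  intro d hd
  rw [if_neg]
  rintro ⟨-, h2⟩
  simp at hd
  omega

lemma sum_list_range (n : Nat) (f : Nat → Int) : ((List.range n).map f).sum = ∑ k ∈ Finset.range n, f k := by
  exact Int.neg_inj.mp rfl

lemma sum_Ioc_eq_range (n : Nat) (f : Nat → Int) :
    ∑ d ∈ Finset.Ioc 0 n, f d = ∑ k ∈ Finset.range n, f (1 + k) := by
  rw [show Finset.Ioc 0 n = Finset.Ico 1 (n+1) from by ext x; simp; omega,
      Finset.sum_Ico_eq_sum_range]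
  simp

lemma sum_map_pyRange (n : Nat) (f : Int → Int) :
    ((PySem.List.pyRange 1 ((n:Int)+1) 1).map f).sum = ∑ d ∈ Finset.Ioc 0 n, f (d : Int) := by
  rw [PySem.List.pyRange_one, show ((n:Int) + 1 - 1).toNat = n by omega, List.map_map,
      sum_list_range, sum_Ioc_eq_range]
  apply Finset.sum_congr rfl
  intro k _
  simp

lemma ssum_shrink (t : Int) (n m : Nat) (hm : m ≤ n) (hn : (n:Int) ≤ t) :
    ssum t m = ∑ d ∈ Finset.Ioc 0 n, (if d ∣ m ∧ d ≤ m then (d:Int) else 0) := by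
  unfold ssum
  symm
  apply Finset.sum_subset (Finset.Ioc_subset_Ioc_right (by omega))
  intro d hd hdn
  simp only [Finset.mem_Ioc] at hd hdn
  rw [if_neg]
  rintro ⟨-, h2⟩
  omega

lemma key_identity (t : Int) (n : Nat) (hn : (n:Int) ≤ t) :
    ∑ m ∈ Finset.Ioc 0 n, ssum t m = ∑ d ∈ Finset.Ioc 0 n, (d:Int) * ((n / d : Nat) : Int) := by
  rw [Finset.sum_congr rfl (fun m hm => ssum_shrink t n m (Finset.mem_Ioc.mp hm).2 hn),
      Finset.sum_comm]
  apply Finset.sum_congr rfl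
  intro d hd
  obtain ⟨hd0, hdn⟩ := Finset.mem_Ioc.mp hd
  have : ∀ m ∈ Finset.Ioc 0 n, (if d ∣ m ∧ d ≤ m then (d:Int) else 0) = (if d ∣ m then (d:Int) else 0) := by
    intro m hm
    obtain ⟨hm0, -⟩ := Finset.mem_Ioc.mp hm
    by_cases h : d ∣ m
    · rw [if_pos ⟨h, Nat.le_of_dvd hm0 h⟩, if_pos h]
    · rw [if_neg (by tauto), if_neg h]
  rw [Finset.sum_congr rfl this, ← Finset.sum_filter, Finset.sum_const,
      Nat.Ioc_filter_dvd_card_eq_div]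
  simp [mul_comm]

lemma sumSigmaS_eval (n : Int) (hn : 0 ≤ n) :
    sumSigmaS n = ∑ d ∈ Finset.Ioc 0 n.toNat, (d:Int) * ((n.toNat / d : Nat) : Int) := by
  unfold sumSigmaS
  rw [PySem.List.foldl_add, show n + 1 = ((n.toNat : Int)) + 1 by omega, sum_map_pyRange]
  simp only [zero_add]
  apply Finset.sum_congr rfl
  intro d hd
  obtain ⟨hd0, -⟩ := Finset.mem_Ioc.mp hd
  rw [PySem.Int.floordiv_eq_ediv_of_pos (by omega), show n = ((n.toNat : Int)) by omega]
  rw [Int.toNat_natCast, Int.natCast_ediv]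

lemma sieve_final (R : Int) (hR : 0 ≤ R) :
    (PySem.List.pyRange 1 (R + 1) 1).foldl (fun s i =>
      (PySem.List.pyRange i (R + 1) i).foldl (fun s' j =>
        PySem.List.pySetD s' j (PySem.List.pyGetD s' j 0 + i)) s) (List.replicate (R + 1).toNat 0)
      = (List.range (R + 1).toNat).map (fun m => ssum R m) := by
  have h := sieve R hR R.toNat (by omega)
  rw [show ((R.toNat : Int)) = R by omega] at h
  exact h

lemma foldl_mod_add_zero (p : Int) (hp : 0 < p) (f : Int → Int) (l : List Int) :
    l.foldl (fun acc x => PySem.Int.mod (acc + f x) p) 0 = PySem.Int.mod ((l.map f).sum) p := by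
  have h0 : PySem.Int.mod 0 p = 0 := by rw [PySem.Int.mod_eq_emod_of_pos hp]; simp
  conv_lhs => rw [← h0]
  rw [foldl_mod_add p hp f l 0, zero_add]

lemma main_eq (L R : Int) (hL : 0 ≤ L) (hLR : L ≤ R) (hlo : ¬ (max L 1 > R)) :
    range_sigma L R = range_sigma_alt L R := by
  have hR : 0 ≤ R := le_trans hL hLR
  rw [range_sigma_eq_list]
  simp only [rangeSigmaList, range_sigma_alt, if_neg hlo]
  rw [sieve_final R hR]
  rw [foldl_mod_add_zero _ (by norm_num)]
  congr 1
  rw [List.map_congr_left (l := PySem.List.pyRange L (R+1) 1)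
        (f := fun i => PySem.List.pyGetD ((List.range (R + 1).toNat).map (fun m => ssum R m)) i 0)
        (g := fun i => ssum R i.toNat) (by
    intro i hi
    rw [PySem.List.mem_pyRange_one] at hi
    show PySem.List.pyGetD _ _ _ = _
    rw [PySem.List.pyGetD_of_nonneg _ _ (by omega), PySem.List.getD_map_range _ _ _ _ (by omega)])]
  set lo : Int := max L 1 with hlodef
  have hlo1 : 1 ≤ lo := le_max_right L 1
  have hloR : lo ≤ R := by omega
  -- front chunk [L, lo) contributes 0
  rw [PySem.List.pyRange_one_append L lo (R+1) (le_max_left L 1) (by omega), List.map_append,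
      List.sum_append]
  have hfront : ((PySem.List.pyRange L lo 1).map (fun i => ssum R i.toNat)).sum = 0 := by
    by_cases h0 : 1 ≤ L
    · rw [show lo = L by omega, PySem.List.pyRange_one_eq_nil (le_refl L)]
      simp
    · rw [show L = 0 by omega, show lo = 1 by omega,
          show PySem.List.pyRange 0 1 1 = [(0:Int)] from by decide]
      simp [ssum_zero_m]
  -- whole [1, n] chunks evaluate through the divisor-count identity
  have hchunk : ∀ n : Int, 0 ≤ n → n ≤ R →
      ((PySem.List.pyRange 1 (n+1) 1).map (fun i => ssum R i.toNat)).sum = sumSigmaS n := by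
    intro n hn0 hnR
    rw [show n + 1 = ((n.toNat : Int)) + 1 by omega, sum_map_pyRange]
    rw [Finset.sum_congr rfl (fun d _ => by rw [Int.toNat_natCast]),
        key_identity R n.toNat (by omega), sumSigmaS_eval n hn0]
  have hsplit := congrArg (fun l => (l.map (fun i => ssum R i.toNat)).sum)
      (PySem.List.pyRange_one_append 1 lo (R+1) hlo1 (by omega))
  simp only [List.map_append, List.sum_append] at hsplit
  have h1R := hchunk R hR (le_refl R)
  have h1lo := hchunk (lo - 1) (by omega) (by omega)
  rw [sub_add_cancel] at h1lo
  rw [h1R, h1lo] at hsplit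
  rw [hfront]
  omega

-- ===== VERDICT (by name: the statement is the Claim_ definition above) =====
theorem range_sigma_spec : Claim_unchanged_range_sigma := by
  intro L R _ hpre hnd
  unfold D_range_sigma at hnd
  unfold Pre_range_sigma at hpre
  show range_sigma L R = range_sigma_alt L R
  by_cases hLR : R < L
  · rw [range_sigma_eq_list]
    simp only [rangeSigmaList, range_sigma_alt]
    rw [PySem.List.pyRange_one_eq_nil (a := L) (b := R + 1) (by omega), if_pos (by omega)]
    rfl
  · rcases hpre with h | ⟨hR, hLlb⟩
    · omega
    by_cases hL : 0 ≤ L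
    · by_cases hlo : max L 1 > R
      · have h1 : L = 0 := by omega
        have h2 : R = 0 := by omega
        subst h1; subst h2; decide
      · exact main_eq L R hL (by omega) hlo
    · have h1 : L = -1 := by omega
      have h2 : R = 0 := by omega
      subst h1; subst h2; decide

theorem range_sigma_changed : Claim_changed_range_sigma := by unfold Claim_changed_range_sigma; decide
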